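-- pv_equiv track=rewrite | github.com/RabbitBio/RabbitYClust | src/compare.py | cluster_pairs
-- ===== SOURCE A (Python) =====
-- from collections import defaultdict
-- from itertools import combinations
--
-- def cluster_pairs(seq_to_cluster):
--     cluster_map = defaultdict(list)
--     for seq_id, cid in seq_to_cluster.items():
--         cluster_map[cid].append(seq_id)
--
--     pairs = set()
--     for seqs in cluster_map.values():
--         if len(seqs) > 1:
--             for a, b in combinations(seqs, 2):
--                 pairs.add(tuple(sorted((a, b))))
--     return pairs
-- ===== SOURCE B (Python) =====
-- from itertools import combinations
--
-- def cluster_pairs(seq_to_cluster):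
--     pairs = set()
--     done = set()
--     for cid in seq_to_cluster.values():
--         if cid not in done:
--             done.add(cid)
--             members = [s for s, c in seq_to_cluster.items() if c == cid]
--             for a, b in combinations(members, 2):
--                 pairs.add((a, b) if a <= b else (b, a))
--     return pairs
-- ===== Notes on version B (the rewrite author's own statement) =====
-- stated objective: simpler
-- what changed: B drops the defaultdict index entirely: it streams over the cid values with a 'done' set and, for each distinct cluster, re-filters its member ids straight from the input and adds their sorted pairs, so no cluster_map is ever built.
import Mathlib
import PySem

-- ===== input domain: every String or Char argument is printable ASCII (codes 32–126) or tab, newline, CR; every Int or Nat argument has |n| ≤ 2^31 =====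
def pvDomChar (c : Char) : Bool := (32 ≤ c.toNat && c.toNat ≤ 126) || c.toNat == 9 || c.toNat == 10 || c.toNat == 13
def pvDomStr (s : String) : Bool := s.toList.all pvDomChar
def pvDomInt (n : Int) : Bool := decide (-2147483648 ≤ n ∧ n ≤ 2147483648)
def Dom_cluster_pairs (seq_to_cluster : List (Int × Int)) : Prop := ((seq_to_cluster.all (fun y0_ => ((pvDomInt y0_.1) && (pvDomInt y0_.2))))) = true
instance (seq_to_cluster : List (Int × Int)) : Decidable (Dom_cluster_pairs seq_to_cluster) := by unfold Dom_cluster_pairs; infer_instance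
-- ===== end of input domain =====

-- B drops A's defaultdict index: it walks the cid stream with a 'done' set and re-filters the
-- members of each distinct cluster directly from the input (objective: simpler — no intermediate map).

-- ===== PORT A =====
-- tuple(sorted((a, b))) on two ints: exact (two-element stable sort)
def pvSortPair (a b : Int) : Int × Int := if a ≤ b then (a, b) else (b, a)

-- itertools.combinations(xs, 2), in itertools' order: exact
def pvCombs (xs : List Int) : List (Int × Int) :=
  match xs with
  | [] => []
  | x :: t => t.map (fun y => (x, y)) ++ pvCombs t

def cluster_pairs (seq_to_cluster : List (Int × Int)) : List (Int × Int) :=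
  ((seq_to_cluster.foldl (fun d p => d.modify p.2 [] (fun v => v ++ [p.1]))
      (PySem.Dict.empty : PySem.Dict Int (List Int))).values).foldl
    (fun pairs seqs =>
      if 1 < seqs.length then
        (pvCombs seqs).foldl (fun s pr => PySem.Set.add s (pvSortPair pr.1 pr.2)) pairs
      else pairs)
    PySem.Set.empty

-- ===== PORT B =====
def cluster_pairs_alt (seq_to_cluster : List (Int × Int)) : List (Int × Int) :=
  (seq_to_cluster.foldl
    (fun (st : PySem.Set (Int × Int) × PySem.Set Int) p =>
      if p.2 ∈ st.2 then st
      else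
        let members := (seq_to_cluster.filter (fun q => q.2 == p.2)).map (·.1)
        ((pvCombs members).foldl (fun s pr => PySem.Set.add s (pvSortPair pr.1 pr.2)) st.1,
         PySem.Set.add st.2 p.2))
    (PySem.Set.empty, PySem.Set.empty)).1

-- ===== PRECONDITION & SPEC =====
def Spec_cluster_pairs (seq_to_cluster : List (Int × Int)) (out : List (Int × Int)) : Prop := out = cluster_pairs_alt seq_to_cluster
instance (seq_to_cluster : List (Int × Int)) (out : List (Int × Int)) : Decidable (Spec_cluster_pairs seq_to_cluster out) := by unfold Spec_cluster_pairs; infer_instance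

-- ===== CLAIM (what is proved, stated in full; the proofs are below) =====
def Claim_equal_cluster_pairs : Prop := ∀ (seq_to_cluster : List (Int × Int)), Dom_cluster_pairs seq_to_cluster → Spec_cluster_pairs seq_to_cluster (cluster_pairs seq_to_cluster)

-- ===== LEMMAS AND PROOFS =====

-- the per-cluster body shared by both sides: add all sorted member pairs of cluster c
def pvG (l : List (Int × Int)) (s : PySem.Set (Int × Int)) (c : Int) : PySem.Set (Int × Int) :=
  (pvCombs ((l.filter (fun q => q.2 == c)).map (·.1))).foldl
    (fun s pr => PySem.Set.add s (pvSortPair pr.1 pr.2)) s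

-- the cids of cs not already in done, first occurrences in order
def pvNewDistinct (done : PySem.Set Int) (cs : List Int) : List Int :=
  match cs with
  | [] => []
  | c :: t => if c ∈ done then pvNewDistinct done t
              else c :: pvNewDistinct (PySem.Set.add done c) t

lemma pvNewDistinct_append (cs : List Int) : ∀ done : PySem.Set Int,
    done ++ pvNewDistinct done cs = cs.foldl PySem.Set.add done := by
  induction cs with
  | nil => intro done; simp [pvNewDistinct]
  | cons c t ih =>
    intro done
    by_cases h : c ∈ done
    · simp [pvNewDistinct, h, List.foldl_cons, ih done]
    · simp only [pvNewDistinct, List.foldl_cons]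
      rw [if_neg h, ← ih (PySem.Set.add done c), PySem.Set.add_of_not_mem h]
      simp

-- unrolling B's loop: the state after folding cs is (fold of pvG over the new distinct cids, done updated)
lemma pvB_fold (l : List (Int × Int)) (cs : List (Int × Int)) :
    ∀ (s : PySem.Set (Int × Int)) (done : PySem.Set Int),
    cs.foldl
      (fun (st : PySem.Set (Int × Int) × PySem.Set Int) p =>
        if p.2 ∈ st.2 then st
        else
          ((pvCombs ((l.filter (fun q => q.2 == p.2)).map (·.1))).foldl
              (fun s pr => PySem.Set.add s (pvSortPair pr.1 pr.2)) st.1,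
           PySem.Set.add st.2 p.2))
      (s, done)
    = ((pvNewDistinct done (cs.map (·.2))).foldl (pvG l) s,
       (cs.map (·.2)).foldl PySem.Set.add done) := by
  induction cs with
  | nil => intro s done; simp [pvNewDistinct]
  | cons p t ih =>
    intro s done
    by_cases hm : p.2 ∈ done
    · simp [pvNewDistinct, hm, ih]
    · simp [pvNewDistinct, hm, ih, pvG]

-- the `if len(seqs) > 1` guard is redundant: pvCombs of a short list is empty
lemma pvStep_if (pairs : PySem.Set (Int × Int)) (seqs : List Int) :
    (if 1 < seqs.length then
        (pvCombs seqs).foldl (fun s pr => PySem.Set.add s (pvSortPair pr.1 pr.2)) pairs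
      else pairs)
    = (pvCombs seqs).foldl (fun s pr => PySem.Set.add s (pvSortPair pr.1 pr.2)) pairs := by
  match seqs with
  | [] => simp [pvCombs]
  | [x] => simp [pvCombs]
  | x :: y :: t => simp [List.length]

-- A's cluster_map.values is: for each distinct cid in first-occurrence order, the member ids in input order
lemma pvA_values (l : List (Int × Int)) :
    (l.foldl (fun d p => d.modify p.2 [] (fun v => v ++ [p.1])) PySem.Dict.empty).values
    = (PySem.Set.ofList (l.map (·.2))).map
        (fun c => (l.filter (fun q => q.2 == c)).map (·.1)) := by
  have hfold : l.foldl (fun d p => d.modify p.2 [] (fun v => v ++ [p.1]))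
      (PySem.Dict.empty : PySem.Dict Int (List Int))
      = (l.map Prod.swap).foldl (fun d p => d.modify p.1 [] (fun v => v ++ [p.2])) PySem.Dict.empty := by
    rw [List.foldl_map]; rfl
  have hkeys : (l.foldl (fun d p => d.modify p.2 [] (fun v => v ++ [p.1]))
      (PySem.Dict.empty : PySem.Dict Int (List Int))).keys = PySem.Set.ofList (l.map (·.2)) := by
    have := PySem.Dict.keys_foldl_modify_key l (fun p => p.2) []
      (fun _ p => fun v => v ++ [p.1]) (PySem.Dict.empty : PySem.Dict Int (List Int))
    simpa [PySem.Set.ofList_eq_foldl, PySem.Set.update, PySem.Dict.empty, PySem.Dict.keys] using this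
  have hnd : (l.foldl (fun d p => d.modify p.2 [] (fun v => v ++ [p.1]))
      (PySem.Dict.empty : PySem.Dict Int (List Int))).keys.Nodup := by
    exact PySem.Dict.nodup_keys_foldl_modify_key l (fun p => p.2) []
      (fun _ p => fun v => v ++ [p.1]) PySem.Dict.empty (by simp [PySem.Dict.empty, PySem.Dict.keys])
  rw [PySem.Dict.values_eq_map_keys _ hnd [], hkeys]
  apply List.map_congr_left
  intro c _
  rw [hfold, PySem.Dict.getD_foldl_modify_append]
  simp [List.filter_map, List.map_map, Function.comp_def, Prod.swap]

theorem cluster_pairs_eq_alt (l : List (Int × Int)) : cluster_pairs l = cluster_pairs_alt l := by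
  unfold cluster_pairs cluster_pairs_alt
  rw [pvB_fold]
  have hA : (fun (pairs : PySem.Set (Int × Int)) (seqs : List Int) =>
        if 1 < seqs.length then
          (pvCombs seqs).foldl (fun s pr => PySem.Set.add s (pvSortPair pr.1 pr.2)) pairs
        else pairs)
      = (fun pairs seqs =>
          (pvCombs seqs).foldl (fun s pr => PySem.Set.add s (pvSortPair pr.1 pr.2)) pairs) := by
    funext pairs seqs
    exact pvStep_if pairs seqs
  rw [pvA_values, hA, List.foldl_map]
  have : pvNewDistinct PySem.Set.empty (l.map (·.2)) = PySem.Set.ofList (l.map (·.2)) := by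
    have := pvNewDistinct_append (l.map (·.2)) PySem.Set.empty
    simpa [PySem.Set.empty, PySem.Set.ofList_eq_foldl] using this
  rw [this]
  rfl

-- ===== VERDICT (by name: the statement is the Claim_ definition above) =====
theorem cluster_pairs_spec : Claim_equal_cluster_pairs := by
  intro l _
  unfold Spec_cluster_pairs
  exact cluster_pairs_eq_alt l
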